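-- pv_equiv track=rewrite | github.com/SiddharthShah30/Tricket.py | main.py | pick_potm
-- ===== SOURCE A (Python) =====
-- TEAMS = {
--     "India": [
--         "Rohit Sharma", "Shubman Gill", "Virat Kohli",
--         "Shreyas Iyer", "KL Rahul",
--         "Hardik Pandya", "Ravindra Jadeja",
--         "Jasprit Bumrah", "Mohammed Shami",
--         "Mohammed Siraj", "Kuldeep Yadav"
--     ],
--     "Australia": [
--         "David Warner", "Travis Head", "Steve Smith",
--         "Marnus Labuschagne", "Glenn Maxwell",
--         "Marcus Stoinis", "Alex Carey",
--         "Pat Cummins", "Mitchell Starc",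
--         "Josh Hazlewood", "Adam Zampa"
--     ],
--     "England": [
--         "Jason Roy", "Jonny Bairstow", "Joe Root",
--         "Ben Stokes", "Jos Buttler",
--         "Liam Livingstone", "Moeen Ali",
--         "Mark Wood", "Jofra Archer",
--         "Adil Rashid", "Reece Topley"
--     ],
--     "New Zealand": [
--         "Devon Conway", "Will Young", "Kane Williamson",
--         "Daryl Mitchell", "Glenn Phillips",
--         "Tom Latham", "Mitchell Santner",
--         "Trent Boult", "Tim Southee",
--         "Matt Henry", "Ish Sodhi"
--     ],
--     "South Africa": [
--         "Quinton de Kock", "Temba Bavuma", "Aiden Markram",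
--         "Rassie van der Dussen", "David Miller",
--         "Marco Jansen", "Kagiso Rabada",
--         "Anrich Nortje", "Lungi Ngidi",
--         "Keshav Maharaj", "Tabraiz Shamsi"
--     ],
--     "Pakistan": [
--         "Babar Azam", "Mohammad Rizwan", "Fakhar Zaman",
--         "Imam-ul-Haq", "Saud Shakeel",
--         "Shadab Khan", "Iftikhar Ahmed",
--         "Shaheen Afridi", "Naseem Shah",
--         "Haris Rauf", "Usama Mir"
--     ],
--     "Sri Lanka": [
--         "Pathum Nissanka", "Kusal Mendis", "Charith Asalanka",
--         "Dhananjaya de Silva", "Sadeera Samarawickrama",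
--         "Wanindu Hasaranga", "Dasun Shanaka",
--         "Maheesh Theekshana", "Dilshan Madushanka",
--         "Matheesha Pathirana", "Kasun Rajitha"
--     ],
--     "West Indies": [
--         "Brandon King", "Shai Hope", "Nicholas Pooran",
--         "Shimron Hetmyer", "Rovman Powell",
--         "Jason Holder", "Andre Russell",
--         "Alzarri Joseph", "Akeal Hosein",
--         "Romario Shepherd", "Gudakesh Motie"
--     ],
--     "Bangladesh": [
--         "Litton Das", "Najmul Hossain Shanto", "Shakib Al Hasan",
--         "Mushfiqur Rahim", "Mehidy Hasan Miraz",
--         "Mahmudullah", "Taskin Ahmed",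
--         "Mustafizur Rahman", "Nasum Ahmed",
--         "Tanzim Hasan Sakib", "Rishad Hossain"
--     ],
--     "Afghanistan": [
--         "Rahmanullah Gurbaz", "Ibrahim Zadran", "Hashmatullah Shahidi",
--         "Azmatullah Omarzai", "Mohammad Nabi",
--         "Rashid Khan", "Mujeeb Ur Rahman",
--         "Fazalhaq Farooqi", "Naveen-ul-Haq",
--         "Noor Ahmad", "Gulbadin Naib"
--     ]
-- }
--
-- def pick_potm(t1, t2, br1, bb1, bs1, br2, bb2, bs2):
--     candidates = []
--     for i, name in enumerate(TEAMS[t1]):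
--         sc = br1.get(i, 0) + bs1.get(name, {}).get("wickets", 0) * 25
--         candidates.append((sc, name, t1, bs1))
--     for i, name in enumerate(TEAMS[t2]):
--         sc = br2.get(i, 0) + bs2.get(name, {}).get("wickets", 0) * 25
--         candidates.append((sc, name, t2, bs2))
--     candidates.sort(key=lambda x: x[0], reverse=True)
--     return candidates[0] if candidates else (0, "Unknown", "", {})
-- ===== SOURCE B (Python) =====
-- TEAMS = {
--     "India": [
--         "Rohit Sharma", "Shubman Gill", "Virat Kohli",
--         "Shreyas Iyer", "KL Rahul",
--         "Hardik Pandya", "Ravindra Jadeja",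
--         "Jasprit Bumrah", "Mohammed Shami",
--         "Mohammed Siraj", "Kuldeep Yadav"
--     ],
--     "Australia": [
--         "David Warner", "Travis Head", "Steve Smith",
--         "Marnus Labuschagne", "Glenn Maxwell",
--         "Marcus Stoinis", "Alex Carey",
--         "Pat Cummins", "Mitchell Starc",
--         "Josh Hazlewood", "Adam Zampa"
--     ],
--     "England": [
--         "Jason Roy", "Jonny Bairstow", "Joe Root",
--         "Ben Stokes", "Jos Buttler",
--         "Liam Livingstone", "Moeen Ali",
--         "Mark Wood", "Jofra Archer",
--         "Adil Rashid", "Reece Topley"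
--     ],
--     "New Zealand": [
--         "Devon Conway", "Will Young", "Kane Williamson",
--         "Daryl Mitchell", "Glenn Phillips",
--         "Tom Latham", "Mitchell Santner",
--         "Trent Boult", "Tim Southee",
--         "Matt Henry", "Ish Sodhi"
--     ],
--     "South Africa": [
--         "Quinton de Kock", "Temba Bavuma", "Aiden Markram",
--         "Rassie van der Dussen", "David Miller",
--         "Marco Jansen", "Kagiso Rabada",
--         "Anrich Nortje", "Lungi Ngidi",
--         "Keshav Maharaj", "Tabraiz Shamsi"
--     ],
--     "Pakistan": [
--         "Babar Azam", "Mohammad Rizwan", "Fakhar Zaman",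
--         "Imam-ul-Haq", "Saud Shakeel",
--         "Shadab Khan", "Iftikhar Ahmed",
--         "Shaheen Afridi", "Naseem Shah",
--         "Haris Rauf", "Usama Mir"
--     ],
--     "Sri Lanka": [
--         "Pathum Nissanka", "Kusal Mendis", "Charith Asalanka",
--         "Dhananjaya de Silva", "Sadeera Samarawickrama",
--         "Wanindu Hasaranga", "Dasun Shanaka",
--         "Maheesh Theekshana", "Dilshan Madushanka",
--         "Matheesha Pathirana", "Kasun Rajitha"
--     ],
--     "West Indies": [
--         "Brandon King", "Shai Hope", "Nicholas Pooran",
--         "Shimron Hetmyer", "Rovman Powell",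
--         "Jason Holder", "Andre Russell",
--         "Alzarri Joseph", "Akeal Hosein",
--         "Romario Shepherd", "Gudakesh Motie"
--     ],
--     "Bangladesh": [
--         "Litton Das", "Najmul Hossain Shanto", "Shakib Al Hasan",
--         "Mushfiqur Rahim", "Mehidy Hasan Miraz",
--         "Mahmudullah", "Taskin Ahmed",
--         "Mustafizur Rahman", "Nasum Ahmed",
--         "Tanzim Hasan Sakib", "Rishad Hossain"
--     ],
--     "Afghanistan": [
--         "Rahmanullah Gurbaz", "Ibrahim Zadran", "Hashmatullah Shahidi",
--         "Azmatullah Omarzai", "Mohammad Nabi",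
--         "Rashid Khan", "Mujeeb Ur Rahman",
--         "Fazalhaq Farooqi", "Naveen-ul-Haq",
--         "Noor Ahmad", "Gulbadin Naib"
--     ]
-- }
--
-- def pick_potm(t1, t2, br1, bb1, bs1, br2, bb2, bs2):
--     # single pass: keep the best candidate seen so far; strict '>' keeps the
--     # first player (team1 before team2, batting order) on ties, like a stable
--     # reverse sort would.
--     best = None
--     for t, br, bs in ((t1, br1, bs1), (t2, br2, bs2)):
--         for i, name in enumerate(TEAMS[t]):
--             sc = br.get(i, 0) + bs.get(name, {}).get("wickets", 0) * 25
--             if best is None or sc > best[0]: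
--                 best = (sc, name, t, bs)
--     return best if best is not None else (0, "Unknown", "", {})
-- ===== Notes on version B (the rewrite author's own statement) =====
-- stated objective: simpler
-- what changed: Instead of materialising all 22 candidate tuples and running a stable reverse sort to take the head, B tracks a single running best tuple in one pass (strict '>' so ties keep the first player in order), never building or sorting a list.
import Mathlib
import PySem

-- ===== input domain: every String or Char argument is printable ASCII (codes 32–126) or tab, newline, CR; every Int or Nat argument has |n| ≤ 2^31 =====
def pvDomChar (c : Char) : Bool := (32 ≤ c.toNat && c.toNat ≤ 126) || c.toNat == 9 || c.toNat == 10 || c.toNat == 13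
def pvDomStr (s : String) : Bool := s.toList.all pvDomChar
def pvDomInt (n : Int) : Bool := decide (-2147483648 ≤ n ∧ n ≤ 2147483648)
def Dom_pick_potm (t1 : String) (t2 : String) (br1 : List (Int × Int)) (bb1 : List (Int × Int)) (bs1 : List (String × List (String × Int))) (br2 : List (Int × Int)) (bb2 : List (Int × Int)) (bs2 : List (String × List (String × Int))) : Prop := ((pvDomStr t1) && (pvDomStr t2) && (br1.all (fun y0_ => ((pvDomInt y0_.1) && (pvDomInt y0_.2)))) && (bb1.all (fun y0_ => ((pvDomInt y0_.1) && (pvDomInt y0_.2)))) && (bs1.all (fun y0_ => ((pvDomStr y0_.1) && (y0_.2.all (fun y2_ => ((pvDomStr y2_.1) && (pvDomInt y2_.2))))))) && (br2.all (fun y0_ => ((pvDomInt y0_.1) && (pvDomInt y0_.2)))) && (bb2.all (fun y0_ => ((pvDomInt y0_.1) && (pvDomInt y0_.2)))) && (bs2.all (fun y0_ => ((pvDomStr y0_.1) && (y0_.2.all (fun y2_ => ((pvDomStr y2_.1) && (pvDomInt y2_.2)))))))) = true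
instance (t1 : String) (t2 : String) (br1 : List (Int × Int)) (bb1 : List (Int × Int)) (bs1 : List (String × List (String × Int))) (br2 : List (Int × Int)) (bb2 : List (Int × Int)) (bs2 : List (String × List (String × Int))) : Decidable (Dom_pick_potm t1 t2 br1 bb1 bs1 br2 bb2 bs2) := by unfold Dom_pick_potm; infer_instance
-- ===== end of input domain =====

-- B replaces A's append-all-22-candidates-then-stable-reverse-sort by a single pass that
-- tracks the running best tuple (strict '>' keeps the first player on ties): simpler.

-- the module-level TEAMS constant
def pvTeams : PySem.Dict String (List String) := PySem.Dict.mk [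
  ("India", ["Rohit Sharma", "Shubman Gill", "Virat Kohli", "Shreyas Iyer", "KL Rahul", "Hardik Pandya", "Ravindra Jadeja", "Jasprit Bumrah", "Mohammed Shami", "Mohammed Siraj", "Kuldeep Yadav"]),
  ("Australia", ["David Warner", "Travis Head", "Steve Smith", "Marnus Labuschagne", "Glenn Maxwell", "Marcus Stoinis", "Alex Carey", "Pat Cummins", "Mitchell Starc", "Josh Hazlewood", "Adam Zampa"]),
  ("England", ["Jason Roy", "Jonny Bairstow", "Joe Root", "Ben Stokes", "Jos Buttler", "Liam Livingstone", "Moeen Ali", "Mark Wood", "Jofra Archer", "Adil Rashid", "Reece Topley"]),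
  ("New Zealand", ["Devon Conway", "Will Young", "Kane Williamson", "Daryl Mitchell", "Glenn Phillips", "Tom Latham", "Mitchell Santner", "Trent Boult", "Tim Southee", "Matt Henry", "Ish Sodhi"]),
  ("South Africa", ["Quinton de Kock", "Temba Bavuma", "Aiden Markram", "Rassie van der Dussen", "David Miller", "Marco Jansen", "Kagiso Rabada", "Anrich Nortje", "Lungi Ngidi", "Keshav Maharaj", "Tabraiz Shamsi"]),
  ("Pakistan", ["Babar Azam", "Mohammad Rizwan", "Fakhar Zaman", "Imam-ul-Haq", "Saud Shakeel", "Shadab Khan", "Iftikhar Ahmed", "Shaheen Afridi", "Naseem Shah", "Haris Rauf", "Usama Mir"]),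
  ("Sri Lanka", ["Pathum Nissanka", "Kusal Mendis", "Charith Asalanka", "Dhananjaya de Silva", "Sadeera Samarawickrama", "Wanindu Hasaranga", "Dasun Shanaka", "Maheesh Theekshana", "Dilshan Madushanka", "Matheesha Pathirana", "Kasun Rajitha"]),
  ("West Indies", ["Brandon King", "Shai Hope", "Nicholas Pooran", "Shimron Hetmyer", "Rovman Powell", "Jason Holder", "Andre Russell", "Alzarri Joseph", "Akeal Hosein", "Romario Shepherd", "Gudakesh Motie"]),
  ("Bangladesh", ["Litton Das", "Najmul Hossain Shanto", "Shakib Al Hasan", "Mushfiqur Rahim", "Mehidy Hasan Miraz", "Mahmudullah", "Taskin Ahmed", "Mustafizur Rahman", "Nasum Ahmed", "Tanzim Hasan Sakib", "Rishad Hossain"]),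
  ("Afghanistan", ["Rahmanullah Gurbaz", "Ibrahim Zadran", "Hashmatullah Shahidi", "Azmatullah Omarzai", "Mohammad Nabi", "Rashid Khan", "Mujeeb Ur Rahman", "Fazalhaq Farooqi", "Naveen-ul-Haq", "Noor Ahmad", "Gulbadin Naib"])
]

-- sc = br.get(i, 0) + bs.get(name, {}).get("wickets", 0) * 25  (shared score expression of both Pythons)
def pvScore (br : List (Int × Int)) (bs : List (String × List (String × Int))) (i : Int) (name : String) : Int :=
  (PySem.Dict.mk br).getD i 0 + ((PySem.Dict.mk ((PySem.Dict.mk bs).getD name [])).getD "wickets" 0) * 25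

-- ===== PORT A =====
-- TEAMS[t] is looked up with default []; Pre_pick_potm guarantees both team names are
-- present (Python raises KeyError otherwise), so the default is never used under Pre_.
def pick_potm (t1 : String) (t2 : String) (br1 : List (Int × Int)) (bb1 : List (Int × Int)) (bs1 : List (String × List (String × Int))) (br2 : List (Int × Int)) (bb2 : List (Int × Int)) (bs2 : List (String × List (String × Int))) : Int × String × String × (List (String × List (String × Int))) :=
  let cands1 := (PySem.List.enumerate (pvTeams.getD t1 [])).foldl
      (fun acc p => acc ++ [(pvScore br1 bs1 p.1 p.2, p.2, t1, bs1)]) []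
  let cands := (PySem.List.enumerate (pvTeams.getD t2 [])).foldl
      (fun acc p => acc ++ [(pvScore br2 bs2 p.1 p.2, p.2, t2, bs2)]) cands1
  (PySem.List.sorted cands (fun x => x.1) true).headD (0, "Unknown", "", [])

-- ===== PORT B =====
-- B's running-best update: take the new element iff there is no best yet or its key is
-- strictly larger ('if best is None or sc > best[0]')
def pvBest {α : Type} (key : α → Int) (b : Option α) (x : α) : Option α :=
  match b with
  | none => some x
  | some bb => if key bb < key x then some x else some bb

-- one step of B's single pass over a team: score the player, update the running best
def pvAltStep (t : String) (br : List (Int × Int)) (bs : List (String × List (String × Int)))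
    (best : Option (Int × String × String × (List (String × List (String × Int))))) (p : Int × String) :
    Option (Int × String × String × (List (String × List (String × Int)))) :=
  pvBest (fun x => x.1) best (pvScore br bs p.1 p.2, p.2, t, bs)

def pick_potm_alt (t1 : String) (t2 : String) (br1 : List (Int × Int)) (bb1 : List (Int × Int)) (bs1 : List (String × List (String × Int))) (br2 : List (Int × Int)) (bb2 : List (Int × Int)) (bs2 : List (String × List (String × Int))) : Int × String × String × (List (String × List (String × Int))) :=
  let best := (PySem.List.enumerate (pvTeams.getD t1 [])).foldl (pvAltStep t1 br1 bs1) none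
  let best := (PySem.List.enumerate (pvTeams.getD t2 [])).foldl (pvAltStep t2 br2 bs2) best
  best.getD (0, "Unknown", "", [])

-- DecidableEq of the result tuple, assembled by hand (the automatic search exceeds the
-- default instance-size limit on this 4-component type); used only by the Spec_ instance
def pvDecEqOut : DecidableEq (Int × String × String × (List (String × List (String × Int)))) := by
  intro a b
  letI d1 : DecidableEq (String × List (String × Int)) := instDecidableEqProd
  letI d2 : DecidableEq (List (String × List (String × Int))) := inferInstance
  letI d3 : DecidableEq (String × String × List (String × List (String × Int))) := instDecidableEqProd
  exact instDecidableEqProd a b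

-- ===== PRECONDITION & SPEC =====
-- Pre_ excludes exactly the inputs where Python's A raises KeyError: t1 or t2 not a key of TEAMS.
def Pre_pick_potm (t1 : String) (t2 : String) (br1 : List (Int × Int)) (bb1 : List (Int × Int)) (bs1 : List (String × List (String × Int))) (br2 : List (Int × Int)) (bb2 : List (Int × Int)) (bs2 : List (String × List (String × Int))) : Prop :=
  pvTeams.contains t1 = true ∧ pvTeams.contains t2 = true
instance (t1 : String) (t2 : String) (br1 : List (Int × Int)) (bb1 : List (Int × Int)) (bs1 : List (String × List (String × Int))) (br2 : List (Int × Int)) (bb2 : List (Int × Int)) (bs2 : List (String × List (String × Int))) : Decidable (Pre_pick_potm t1 t2 br1 bb1 bs1 br2 bb2 bs2) := by unfold Pre_pick_potm; infer_instance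

def pvWitness_pick_potm : String × String × (List (Int × Int)) × (List (Int × Int)) × (List (String × List (String × Int))) × (List (Int × Int)) × (List (Int × Int)) × (List (String × List (String × Int))) :=
  ("India", "Australia", [], [], [], [], [], [])

def Spec_pick_potm (t1 : String) (t2 : String) (br1 : List (Int × Int)) (bb1 : List (Int × Int)) (bs1 : List (String × List (String × Int))) (br2 : List (Int × Int)) (bb2 : List (Int × Int)) (bs2 : List (String × List (String × Int))) (out : Int × String × String × (List (String × List (String × Int)))) : Prop := out = pick_potm_alt t1 t2 br1 bb1 bs1 br2 bb2 bs2
instance (t1 : String) (t2 : String) (br1 : List (Int × Int)) (bb1 : List (Int × Int)) (bs1 : List (String × List (String × Int))) (br2 : List (Int × Int)) (bb2 : List (Int × Int)) (bs2 : List (String × List (String × Int))) (out : Int × String × String × (List (String × List (String × Int)))) : Decidable (Spec_pick_potm t1 t2 br1 bb1 bs1 br2 bb2 bs2 out) := by unfold Spec_pick_potm; exact pvDecEqOut _ _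

-- ===== CLAIM (what is proved, stated in full; the proofs are below) =====
def Claim_equal_pick_potm : Prop := ∀ (t1 : String) (t2 : String) (br1 : List (Int × Int)) (bb1 : List (Int × Int)) (bs1 : List (String × List (String × Int))) (br2 : List (Int × Int)) (bb2 : List (Int × Int)) (bs2 : List (String × List (String × Int))), Dom_pick_potm t1 t2 br1 bb1 bs1 br2 bb2 bs2 → Pre_pick_potm t1 t2 br1 bb1 bs1 br2 bb2 bs2 → Spec_pick_potm t1 t2 br1 bb1 bs1 br2 bb2 bs2 (pick_potm t1 t2 br1 bb1 bs1 br2 bb2 bs2)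

-- ===== LEMMAS AND PROOFS =====

-- the head of Python's stable reverse-insertion sort is computed by B's strict-'>' running-best fold
theorem pvHead_insert_fold {α : Type} (key : α → Int) (cs : List α) (acc : List α) :
    (List.foldl (fun a x => PySem.List.insertBy (fun a b => decide (key b < key a)) x a) acc cs).head? =
    List.foldl (pvBest key) acc.head? cs := by
  induction cs generalizing acc with
  | nil => rfl
  | cons x cs ih =>
    simp only [List.foldl_cons]
    rw [ih]
    congr 1
    cases acc with
    | nil => rfl
    | cons y ys =>
      simp only [PySem.List.insertBy, List.head?_cons, pvBest]
      split <;> simp_all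

-- the head of Python's stable reverse sort, as B's fold
theorem pvSortedRevHead {α : Type} (key : α → Int) (cs : List α) :
    (PySem.List.sorted cs key true).head? =
    cs.foldl (pvBest key) none := by
  rw [PySem.List.sorted_rev_eq_foldl_insertBy, pvHead_insert_fold]
  rfl

theorem pvWitness_ok : Dom_pick_potm (pvWitness_pick_potm.1) (pvWitness_pick_potm.2.1) (pvWitness_pick_potm.2.2.1) (pvWitness_pick_potm.2.2.2.1) (pvWitness_pick_potm.2.2.2.2.1) (pvWitness_pick_potm.2.2.2.2.2.1) (pvWitness_pick_potm.2.2.2.2.2.2.1) (pvWitness_pick_potm.2.2.2.2.2.2.2) ∧ Pre_pick_potm (pvWitness_pick_potm.1) (pvWitness_pick_potm.2.1) (pvWitness_pick_potm.2.2.1) (pvWitness_pick_potm.2.2.2.1) (pvWitness_pick_potm.2.2.2.2.1) (pvWitness_pick_potm.2.2.2.2.2.1) (pvWitness_pick_potm.2.2.2.2.2.2.1) (pvWitness_pick_potm.2.2.2.2.2.2.2) := by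
  decide

-- ===== VERDICT (by name: the statement is the Claim_ definition above) =====
theorem pick_potm_spec : Claim_equal_pick_potm := by
  intro t1 t2 br1 bb1 bs1 br2 bb2 bs2 _ _
  unfold Spec_pick_potm pick_potm pick_potm_alt
  simp only [PySem.List.foldl_append_singleton_eq_map, List.nil_append, List.headD_eq_head?,
    pvSortedRevHead (fun x : Int × String × String × (List (String × List (String × Int))) => x.1),
    List.foldl_append, List.foldl_map]
  rfl
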